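-- pv_equiv track=rewrite | github.com/tmathmeyer/advent.of.code | 2025/10/solution.py | parse_target
-- ===== SOURCE A (Python) =====
-- def parse_target(targetstr):
--   c = 0
--   d = 1
--   for bit in targetstr[1:-1]:
--     if bit == '#':
--       c += d
--     d *= 2
--   return c
-- ===== SOURCE B (Python) =====
-- def parse_target(targetstr):
--   inner = targetstr[1:-1]
--   if not inner:
--     return 0
--   binstr = ''.join('1' if ch == '#' else '0' for ch in reversed(inner))
--   return int(binstr, 2)
-- ===== Notes on version B (the rewrite author's own statement) =====
-- stated objective: faster
-- what changed: Replaces the manual LSB-first bit accumulator (running weight d doubled each step, so d grows to an n-bit bignum) with building a reversed binary string and a single base-2 parse via int(binstr, 2), guarding only the empty slice.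
import Mathlib
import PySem

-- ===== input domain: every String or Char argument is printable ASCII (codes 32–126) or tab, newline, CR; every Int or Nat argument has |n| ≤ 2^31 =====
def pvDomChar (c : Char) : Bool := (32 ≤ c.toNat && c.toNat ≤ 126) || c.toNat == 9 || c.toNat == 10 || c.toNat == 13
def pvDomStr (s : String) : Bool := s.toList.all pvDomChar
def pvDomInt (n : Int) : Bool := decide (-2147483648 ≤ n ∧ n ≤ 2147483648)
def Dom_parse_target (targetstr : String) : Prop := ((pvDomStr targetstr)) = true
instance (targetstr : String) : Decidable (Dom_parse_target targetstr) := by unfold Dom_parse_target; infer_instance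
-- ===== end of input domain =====

-- B replaces A's manual LSB-first bit accumulation with building a reversed binary string and one base-2 parse (idiomatic decomposition).


-- ===== PORT A =====
-- step of A's loop: state (c, d); '#' adds the current weight d, d doubles each step
def pvAStep (cd : Int × Int) (bit : Char) : Int × Int :=
  (if bit = '#' then cd.1 + cd.2 else cd.1, cd.2 * 2)

def parse_target (targetstr : String) : Int :=
  ((PySem.List.slice targetstr.toList (some 1) (some (-1))).foldl pvAStep (0, 1)).1

-- ===== PORT B =====
-- int(binstr, 2): left-to-right base-2 accumulation over a '0'/'1' string (exact on such strings)
def pvParseBin (l : List Char) : Int :=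
  l.foldl (fun acc ch => acc * 2 + (if ch = '1' then 1 else 0)) 0

def parse_target_alt (targetstr : String) : Int :=
  let inner := PySem.List.slice targetstr.toList (some 1) (some (-1))
  if inner = [] then 0
  else pvParseBin ((inner.map (fun ch => if ch = '#' then '1' else '0')).reverse)

-- ===== PRECONDITION & SPEC =====
def Spec_parse_target (targetstr : String) (out : Int) : Prop := out = parse_target_alt targetstr
instance (targetstr : String) (out : Int) : Decidable (Spec_parse_target targetstr out) := by unfold Spec_parse_target; infer_instance

-- ===== CLAIM (what is proved, stated in full; the proofs are below) =====
def Claim_equal_parse_target : Prop := ∀ (targetstr : String), Dom_parse_target targetstr → Spec_parse_target targetstr (parse_target targetstr)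

-- ===== LEMMAS AND PROOFS =====
theorem pvB_cons (x : Char) (l : List Char) :
    pvParseBin (((x :: l).map (fun ch => if ch = '#' then '1' else '0')).reverse)
      = 2 * pvParseBin ((l.map (fun ch => if ch = '#' then '1' else '0')).reverse)
        + (if x = '#' then 1 else 0) := by
  simp [pvParseBin, List.foldl_append]
  ring

theorem pvA_fold (l : List Char) : ∀ (c d : Int),
    (l.foldl pvAStep (c, d)).1
      = c + d * pvParseBin ((l.map (fun ch => if ch = '#' then '1' else '0')).reverse) := by
  induction l with
  | nil => intro c d; simp [pvParseBin]
  | cons x l ih =>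
    intro c d
    rw [List.foldl_cons, pvB_cons]
    have := ih (if x = '#' then c + d else c) (d * 2)
    simp only [pvAStep] at *
    rw [this]
    split_ifs <;> ring

-- ===== VERDICT (by name: the statement is the Claim_ definition above) =====
theorem parse_target_spec : Claim_equal_parse_target := by
  intro s _
  unfold Spec_parse_target parse_target parse_target_alt
  cases h : PySem.List.slice s.toList (some 1) (some (-1)) with
  | nil => simp
  | cons x l => simp only [reduceCtorEq, if_false]; rw [pvA_fold]; ring
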